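-- pv_equiv track=rewrite | github.com/MrBrantCode/unitest_baseline | mut_generate/mist_train_cf/cf_51204/solution.py | fibonacci_squared
-- ===== SOURCE A (Python) =====
-- def fibonacci_squared(n):
--     if n <= 0:
--         return []
--
--     fibonacci_sequence = [0, 1]
--     squared_sequence = [0, 1]
--
--     while len(fibonacci_sequence) < n:
--         next_element = fibonacci_sequence[-1] + fibonacci_sequence[-2]
--         fibonacci_sequence.append(next_element)
--         squared_sequence.append(next_element ** 2)
--
--     return squared_sequence[:n]
-- ===== SOURCE B (Python) =====
-- def fibonacci_squared(n):
--     # Squares of Fibonacci numbers satisfy their own linear recurrence: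
--     # s(k+3) = 2*s(k+2) + 2*s(k+1) - s(k), with s(0)=0, s(1)=1, s(2)=1.
--     # So we emit the squares directly, never computing a Fibonacci number
--     # and never squaring anything.
--     if n <= 0:
--         return []
--     out = []
--     x, y, z = 0, 1, 1
--     for _ in range(n):
--         out.append(x)
--         x, y, z = y, z, 2 * z + 2 * y - x
--     return out
-- ===== Notes on version B (the rewrite author's own statement) =====
-- stated objective: alternative
-- what changed: B never computes a Fibonacci number and never squares: it emits the answer directly using the linear recurrence of Fibonacci squares s(k+3)=2s(k+2)+2s(k+1)-s(k) with three rolling scalars, instead of A's loop that builds the Fibonacci list via fib[-1]+fib[-2] and squares each new element.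
import Mathlib
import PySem

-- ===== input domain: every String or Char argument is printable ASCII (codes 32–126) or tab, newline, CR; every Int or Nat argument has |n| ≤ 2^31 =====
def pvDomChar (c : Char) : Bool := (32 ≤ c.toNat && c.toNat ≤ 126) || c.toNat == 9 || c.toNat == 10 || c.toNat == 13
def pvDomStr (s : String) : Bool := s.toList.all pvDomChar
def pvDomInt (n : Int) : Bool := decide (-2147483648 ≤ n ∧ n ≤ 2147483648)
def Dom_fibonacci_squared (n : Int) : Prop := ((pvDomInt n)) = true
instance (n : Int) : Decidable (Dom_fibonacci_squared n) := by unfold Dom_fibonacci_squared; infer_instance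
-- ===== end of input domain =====

-- B emits the squares directly via the linear recurrence of Fibonacci squares
-- s(k+3) = 2*s(k+2) + 2*s(k+1) - s(k), with three rolling scalars: it never computes a
-- Fibonacci number and never squares, unlike A's parallel-list loop with fib[-1]+fib[-2].

-- ===== PORT A =====
-- the while loop; fib[-1]/fib[-2] ported with pyGetD 0: exact here, the list always has length ≥ 2
def fibLoopA (n : Int) (fib sq : List Int) : List Int :=
  if (fib.length : Int) < n then
    let next := PySem.List.pyGetD fib (-1) 0 + PySem.List.pyGetD fib (-2) 0
    fibLoopA n (fib ++ [next]) (sq ++ [next ^ 2])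
  else sq
termination_by (n.toNat - fib.length : Nat)
decreasing_by simp; omega

def fibonacci_squared (n : Int) : List Int :=
  if n ≤ 0 then []
  else PySem.List.slice (fibLoopA n [0, 1] [0, 1]) none (some n)

-- ===== PORT B =====
-- one iteration of B's for-loop body: append x, then roll (x, y, z) ← (y, z, 2z + 2y − x)
def bStep (st : List Int × Int × Int × Int) (_ : Int) : List Int × Int × Int × Int :=
  (st.1 ++ [st.2.1], st.2.2.1, st.2.2.2, 2 * st.2.2.2 + 2 * st.2.2.1 - st.2.1)

def fibonacci_squared_alt (n : Int) : List Int :=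
  if n ≤ 0 then []
  else ((PySem.List.pyRange 0 n 1).foldl bStep ([], 0, 1, 1)).1

-- ===== PRECONDITION & SPEC =====
def Spec_fibonacci_squared (n : Int) (out : List Int) : Prop := out = fibonacci_squared_alt n
instance (n : Int) (out : List Int) : Decidable (Spec_fibonacci_squared n out) := by unfold Spec_fibonacci_squared; infer_instance

-- ===== CLAIM (what is proved, stated in full; the proofs are below) =====
def Claim_equal_fibonacci_squared : Prop := ∀ (n : Int), Dom_fibonacci_squared n → Spec_fibonacci_squared n (fibonacci_squared n)

-- ===== LEMMAS AND PROOFS =====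

def fibN : Nat → Int
  | 0 => 0
  | 1 => 1
  | k + 2 => fibN k + fibN (k + 1)

def fibPre (k : Nat) : List Int := (List.range k).map fibN

theorem fibPre_length (k : Nat) : (fibPre k).length = k := by simp [fibPre]

theorem fibPre_succ (k : Nat) : fibPre (k + 1) = fibPre k ++ [fibN k] := by
  simp [fibPre, List.range_succ]

theorem fibPre_get_neg1 (k : Nat) (hk : 1 ≤ k) :
    PySem.List.pyGetD (fibPre k) (-1) 0 = fibN (k - 1) := by
  rw [PySem.List.pyGetD_neg_ofNat (fibPre k) 1 0 (by omega) (by simp [fibPre_length]; omega)]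
  simp [fibPre, List.getElem_map, List.getElem_range]

theorem fibPre_get_neg2 (k : Nat) (hk : 2 ≤ k) :
    PySem.List.pyGetD (fibPre k) (-2) 0 = fibN (k - 2) := by
  rw [PySem.List.pyGetD_neg_ofNat (fibPre k) 2 0 (by omega) (by simp [fibPre_length]; omega)]
  simp [fibPre, List.getElem_map, List.getElem_range]

theorem fibN_add (k : Nat) (hk : 2 ≤ k) : fibN (k - 1) + fibN (k - 2) = fibN k := by
  obtain ⟨m, rfl⟩ : ∃ m, k = m + 2 := ⟨k - 2, by omega⟩
  simp [fibN]
  ring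

theorem fibLoopA_eq (n : Int) (fuel k : Nat) (hf : n.toNat - k = fuel) (hk : 2 ≤ k) :
    fibLoopA n (fibPre k) ((fibPre k).map (fun x => x ^ 2)) =
      (fibPre (max k n.toNat)).map (fun x => x ^ 2) := by
  induction fuel generalizing k with
  | zero =>
    rw [fibLoopA]
    rw [if_neg (by simp [fibPre_length]; omega)]
    congr 1
    congr 1
    omega
  | succ m ih =>
    rw [fibLoopA]
    rw [if_pos (by simp [fibPre_length]; omega)]
    rw [fibPre_get_neg1 k (by omega), fibPre_get_neg2 k hk, fibN_add k hk]
    show fibLoopA n (fibPre k ++ [fibN k]) ((fibPre k).map (fun x => x ^ 2) ++ [fibN k ^ 2]) =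
      (fibPre (max k n.toNat)).map (fun x => x ^ 2)
    rw [show fibPre k ++ [fibN k] = fibPre (k + 1) from (fibPre_succ k).symm]
    rw [show (fibPre k).map (fun x => x ^ 2) ++ [fibN k ^ 2] = (fibPre (k + 1)).map (fun x => x ^ 2) by
      simp [fibPre_succ]]
    rw [ih (k + 1) (by omega) (by omega)]
    congr 2
    omega

-- the squares of Fibonacci numbers satisfy s(k+3) = 2 s(k+2) + 2 s(k+1) − s(k)
theorem fib_sq_rec (k : Nat) :
    2 * fibN (k + 2) ^ 2 + 2 * fibN (k + 1) ^ 2 - fibN k ^ 2 = fibN (k + 3) ^ 2 := by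
  have h2 : fibN (k + 2) = fibN k + fibN (k + 1) := by simp [fibN]
  have h3 : fibN (k + 3) = fibN (k + 1) + fibN (k + 2) := by
    show fibN (k + 1 + 2) = _; simp [fibN]
  rw [h3, h2]; ring

theorem foldB_eq (l : List Int) (k : Nat) :
    l.foldl bStep ((fibPre k).map (fun x => x ^ 2), fibN k ^ 2, fibN (k + 1) ^ 2, fibN (k + 2) ^ 2)
      = ((fibPre (k + l.length)).map (fun x => x ^ 2),
         fibN (k + l.length) ^ 2, fibN (k + l.length + 1) ^ 2, fibN (k + l.length + 2) ^ 2) := by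
  induction l generalizing k with
  | nil => simp
  | cons a t ih =>
    show t.foldl bStep (bStep _ a) = _
    rw [show bStep ((fibPre k).map (fun x => x ^ 2), fibN k ^ 2, fibN (k + 1) ^ 2, fibN (k + 2) ^ 2) a
        = ((fibPre (k + 1)).map (fun x => x ^ 2), fibN (k + 1) ^ 2, fibN (k + 1 + 1) ^ 2,
           fibN (k + 1 + 2) ^ 2) by
      simp only [bStep, fibPre_succ, List.map_append, List.map_cons, List.map_nil]
      refine Prod.ext rfl (Prod.ext rfl (Prod.ext rfl ?_))
      show 2 * fibN (k + 2) ^ 2 + 2 * fibN (k + 1) ^ 2 - fibN k ^ 2 = fibN (k + 1 + 2) ^ 2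
      have := fib_sq_rec k
      omega]
    rw [ih (k + 1)]
    simp only [List.length_cons]
    have h : k + 1 + t.length = k + (t.length + 1) := by omega
    rw [h]

-- ===== VERDICT (by name: the statement is the Claim_ definition above) =====
theorem fibonacci_squared_spec : Claim_equal_fibonacci_squared := by
  intro n _
  unfold Spec_fibonacci_squared fibonacci_squared fibonacci_squared_alt
  by_cases hn : n ≤ 0
  · simp [hn]
  · rw [if_neg hn, if_neg hn]
    have hA := fibLoopA_eq n (n.toNat - 2) 2 rfl (by omega)
    rw [show List.map (fun x => x ^ 2) (fibPre 2) = [0, 1] by decide] at hA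
    rw [show fibPre 2 = [0, 1] by decide] at hA
    have hB := foldB_eq (PySem.List.pyRange 0 n 1) 0
    rw [show (fibPre 0).map (fun x => x ^ 2) = ([] : List Int) by decide] at hB
    rw [show fibN 0 ^ 2 = 0 by decide, show fibN (0 + 1) ^ 2 = 1 by decide,
        show fibN (0 + 2) ^ 2 = 1 by decide] at hB
    rw [hA, hB]
    simp only [PySem.List.length_pyRange_one, Int.sub_zero, Nat.zero_add]
    rw [show n = ((n.toNat : Nat) : Int) by omega, PySem.List.slice_to_natCast]
    simp only [Int.toNat_natCast]
    simp only [fibPre, ← List.map_take, List.take_range]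
    rw [show min n.toNat (max 2 n.toNat) = n.toNat by omega]
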